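-- pv_equiv track=rewrite | github.com/justin-qu/Meta_Coding_Challenges | Level 3/Stack_Stabilization_2.py | getMinimumSecondsRequired
-- ===== SOURCE A (Python) =====
-- from typing import List
--
-- def getMinimumSecondsRequired(N: int, R: List[int], A: int, B: int) -> int:
--     ## Redefine Problem
--     R = [r - i for i, r in enumerate(R)]
--
--     ## Get Key Radii
--     key_radii = {max(1, r) for r in R}
--     key_radii = list(key_radii)
--     key_radii.sort()
--
--     cost_for_radius = [0] * len(key_radii)
--     for r in R:
--         for i, key_radius in enumerate(key_radii):
--             delta = key_radius - r
--             cost = 0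
--
--             if delta > 0:
--                 cost = delta * A
--             else:
--                 cost = -delta * B
--
--             if i == 0:
--                 cost_for_radius[0] += cost
--             else:
--                 cost_for_radius[i] = min(cost_for_radius[i-1], cost_for_radius[i] + cost)
--
--     return cost_for_radius[-1]
-- ===== SOURCE B (Python) =====
-- from typing import List
--
-- def getMinimumSecondsRequired(N: int, R: List[int], A: int, B: int) -> int:
--     # Prefix-sum reformulation: for each candidate radius k, build the prefix-sum
--     # array P_k of per-disc costs, and combine columns with a running minimum of
--     # (previous column - P_k); no per-cell min(dp[i-1], dp[i]+cost) recurrence.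
--     S = [r - i for i, r in enumerate(R)]
--     cands = sorted({max(1, r) for r in S})
--
--     def prefix(k):
--         P = [0]
--         for r in S:
--             d = k - r
--             P.append(P[-1] + (d * A if d > 0 else -d * B))
--         return P
--
--     G = prefix(cands[0])
--     for k in cands[1:]:
--         P = prefix(k)
--         m = 0
--         newG = [0]
--         for t in range(1, len(S) + 1):
--             m = min(m, G[t] - P[t])
--             newG.append(P[t] + m)
--         G = newG
--     return G[-1]
-- ===== Notes on version B (the rewrite author's own statement) =====
-- stated objective: alternative
-- what changed: B replaces A's disc-major in-place recurrence dp[i]=min(dp[i-1],dp[i]+cost) by a per-candidate prefix-sum decomposition: for each candidate radius it builds the prefix-sum array of that candidate's per-disc costs and merges it with the previous column via a running minimum of (previous column minus prefix sums), so no per-cell cost recurrence is evaluated.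
import Mathlib
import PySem

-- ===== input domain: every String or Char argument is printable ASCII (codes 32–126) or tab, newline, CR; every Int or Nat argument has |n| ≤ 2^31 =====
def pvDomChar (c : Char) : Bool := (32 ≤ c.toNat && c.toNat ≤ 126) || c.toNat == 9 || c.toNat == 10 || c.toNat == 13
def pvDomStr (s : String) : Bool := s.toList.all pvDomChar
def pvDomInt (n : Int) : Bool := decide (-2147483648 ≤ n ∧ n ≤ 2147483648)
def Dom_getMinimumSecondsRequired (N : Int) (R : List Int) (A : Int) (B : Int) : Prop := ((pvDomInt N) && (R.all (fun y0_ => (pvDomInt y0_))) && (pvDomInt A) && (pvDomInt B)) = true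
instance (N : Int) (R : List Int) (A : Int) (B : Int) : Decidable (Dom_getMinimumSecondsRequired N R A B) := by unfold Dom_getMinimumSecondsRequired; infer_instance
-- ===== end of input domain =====

-- B replaces A's per-cell in-place recurrence by per-candidate prefix-sum arrays merged
-- with a running minimum of (previous column - prefix sums); objective: alternative.

-- ===== PORT A =====
def pvCost (Aa Bb k r : Int) : Int :=
  let delta := k - r
  if delta > 0 then delta * Aa else (-delta) * Bb

-- A's inner loop over enumerate(key_radii): cost_for_radius[i-1] is exactly the entry
-- the previous iteration wrote, so the in-place array pass is transcribed as a structural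
-- recursion over (key, old entry) pairs carrying that entry; same values, same order.
def pvRowA (Aa Bb r : Int) (prev? : Option Int) : List (Int × Int) → List Int
  | [] => []
  | (k, old) :: rest =>
    let cost := pvCost Aa Bb k r
    let v := match prev? with
      | none => old + cost            -- i == 0: cost_for_radius[0] += cost
      | some p => min p (old + cost)  -- else: min(cost_for_radius[i-1], cost_for_radius[i] + cost)
    v :: pvRowA Aa Bb r (some v) rest

def getMinimumSecondsRequired (N : Int) (R : List Int) (A : Int) (B : Int) : Int :=
  let S := (PySem.List.enumerate R).map (fun ir => ir.2 - ir.1)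
  let ks := PySem.List.sorted (PySem.Set.ofList (S.map (fun r => max 1 r))) (fun x => x) false
  let arr := S.foldl (fun arr r => pvRowA A B r none (ks.zip arr)) (List.replicate ks.length 0)
  (PySem.List.pyGet? arr (-1)).getD 0   -- cost_for_radius[-1]: IndexError when R = [] (excluded by Pre_)

-- ===== PORT B =====
-- prefix(k): P = [0]; for r in S: P.append(P[-1] + cost) — recursion carrying P[-1].
def pvPrefixP (Aa Bb k : Int) (acc : Int) : List Int → List Int
  | [] => []
  | r :: rest =>
    let acc' := acc + pvCost Aa Bb k r
    acc' :: pvPrefixP Aa Bb k acc' rest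

-- the merge loop over t = 1..N reading G[t], P[t]: recursion over the paired tails carrying m.
def pvCombine (m : Int) : List (Int × Int) → List Int
  | [] => []
  | (g, p) :: rest =>
    let m' := min m (g - p)
    (p + m') :: pvCombine m' rest

def getMinimumSecondsRequired_alt (N : Int) (R : List Int) (A : Int) (B : Int) : Int :=
  let S := (PySem.List.enumerate R).map (fun ir => ir.2 - ir.1)
  match PySem.List.sorted (PySem.Set.ofList (S.map (fun r => max 1 r))) (fun x => x) false with
  | [] => 0    -- Python: cands[0] raises IndexError here (excluded by Pre_)
  | k0 :: rest =>
    let G0 := (0 : Int) :: pvPrefixP A B k0 0 S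
    let G := rest.foldl (fun G k =>
      let P := (0 : Int) :: pvPrefixP A B k 0 S
      (0 : Int) :: pvCombine 0 ((G.drop 1).zip (P.drop 1))) G0
    (PySem.List.pyGet? G (-1)).getD 0   -- G[-1]

-- ===== PRECONDITION & SPEC =====
-- Pre_ excludes only R = [], on which both Pythons raise IndexError.
def Pre_getMinimumSecondsRequired (N : Int) (R : List Int) (A : Int) (B : Int) : Prop := R ≠ []
instance (N : Int) (R : List Int) (A : Int) (B : Int) : Decidable (Pre_getMinimumSecondsRequired N R A B) := by unfold Pre_getMinimumSecondsRequired; infer_instance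

def pvWitness_getMinimumSecondsRequired : Int × List Int × Int × Int := (3, [2, 5, 3], 4, 1)

def Spec_getMinimumSecondsRequired (N : Int) (R : List Int) (A : Int) (B : Int) (out : Int) : Prop := out = getMinimumSecondsRequired_alt N R A B
instance (N : Int) (R : List Int) (A : Int) (B : Int) (out : Int) : Decidable (Spec_getMinimumSecondsRequired N R A B out) := by unfold Spec_getMinimumSecondsRequired; infer_instance

-- ===== CLAIM (what is proved, stated in full; the proofs are below) =====
def Claim_equal_getMinimumSecondsRequired : Prop := ∀ (N : Int) (R : List Int) (A : Int) (B : Int), Dom_getMinimumSecondsRequired N R A B → Pre_getMinimumSecondsRequired N R A B → Spec_getMinimumSecondsRequired N R A B (getMinimumSecondsRequired N R A B)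

-- ===== LEMMAS AND PROOFS =====

-- The DP table both programs compute: pvTbl t i = min cost to set the first t (shifted)
-- discs to a non-decreasing sequence of candidate radii ending at index ≤ i.
def pvTbl (Aa Bb : Int) (ks S : List Int) : Nat → Nat → Int
  | 0, _ => 0
  | t+1, 0 => pvTbl Aa Bb ks S t 0 + pvCost Aa Bb (ks.getD 0 0) (S.getD t 0)
  | t+1, i+1 => min (pvTbl Aa Bb ks S (t+1) i)
                    (pvTbl Aa Bb ks S t (i+1) + pvCost Aa Bb (ks.getD (i+1) 0) (S.getD t 0))
  termination_by t i => (t, i)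

lemma pvTbl_zero (Aa Bb : Int) (ks S : List Int) (i : Nat) : pvTbl Aa Bb ks S 0 i = 0 := by
  simp [pvTbl]

lemma pvTbl_succ_zero (Aa Bb : Int) (ks S : List Int) (t : Nat) :
    pvTbl Aa Bb ks S (t+1) 0 = pvTbl Aa Bb ks S t 0 + pvCost Aa Bb (ks.getD 0 0) (S.getD t 0) := by
  rw [pvTbl]

lemma pvTbl_succ_succ (Aa Bb : Int) (ks S : List Int) (t i : Nat) :
    pvTbl Aa Bb ks S (t+1) (i+1) = min (pvTbl Aa Bb ks S (t+1) i)
      (pvTbl Aa Bb ks S t (i+1) + pvCost Aa Bb (ks.getD (i+1) 0) (S.getD t 0)) := by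
  rw [pvTbl]

lemma pvRowA_spec (Aa Bb r : Int) (ks : List Int) (f g : Nat → Int)
    (hg0 : g 0 = f 0 + pvCost Aa Bb (ks.getD 0 0) r)
    (hgS : ∀ i, g (i+1) = min (g i) (f (i+1) + pvCost Aa Bb (ks.getD (i+1) 0) r)) :
    ∀ (n j : Nat) (pr : Option Int),
      j + n = ks.length →
      pr = (if j = 0 then none else some (g (j-1))) →
      pvRowA Aa Bb r pr ((ks.drop j).zip ((List.range' j n).map f)) = (List.range' j n).map g := by
  intro n
  induction n with
  | zero => intro j pr _ _; simp [pvRowA]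
  | succ n ih =>
    intro j pr h hpr
    have hj : j < ks.length := by omega
    have hdrop : ks.drop j = ks[j] :: ks.drop (j+1) := List.drop_eq_getElem_cons hj
    have hgd : ks.getD j 0 = ks[j] := List.getD_eq_getElem ks 0 hj
    rw [hdrop, List.range'_succ, List.map_cons, List.zip_cons_cons]
    cases j with
    | zero =>
      subst hpr
      simp only [pvRowA, reduceIte]
      rw [← hgd, ← hg0, List.map_cons]
      refine congrArg₂ List.cons rfl ?_
      simpa using ih 1 (some (g 0)) (by omega) (by simp)
    | succ j' =>
      subst hpr
      rw [if_neg (show ¬(j' + 1 = 0) by omega)]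
      simp only [Nat.add_sub_cancel, pvRowA]
      rw [← hgd, ← hgS j', List.map_cons]
      refine congrArg₂ List.cons rfl ?_
      simpa using ih (j'+2) (some (g (j'+1))) (by omega) (by simp)

-- A's outer fold: after the first t discs the array holds row t of the table.
lemma pvFoldA (Aa Bb : Int) (ks S : List Int) :
    ∀ t, t ≤ S.length →
      (S.take t).foldl (fun arr r => pvRowA Aa Bb r none (ks.zip arr)) (List.replicate ks.length 0)
        = (List.range' 0 ks.length).map (pvTbl Aa Bb ks S t) := by
  intro t
  induction t with
  | zero =>
    intro _
    have : (List.range' 0 ks.length).map (pvTbl Aa Bb ks S 0) = (List.range' 0 ks.length).map (fun _ => (0 : Int)) := by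
      apply List.map_congr_left; intro i _; exact pvTbl_zero Aa Bb ks S i
    simp [this, List.map_const']
  | succ t ih =>
    intro h
    have ht : t < S.length := by omega
    rw [List.take_add_one, List.getElem?_eq_getElem ht]
    simp only [Option.toList_some, List.foldl_append, List.foldl_cons, List.foldl_nil]
    rw [ih (by omega)]
    have hgd : S.getD t 0 = S[t] := List.getD_eq_getElem S 0 ht
    have := pvRowA_spec Aa Bb (S[t]) ks (pvTbl Aa Bb ks S t) (pvTbl Aa Bb ks S (t+1))
      (by rw [← hgd]; exact pvTbl_succ_zero Aa Bb ks S t)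
      (fun i => by rw [← hgd]; exact pvTbl_succ_succ Aa Bb ks S t i)
      ks.length 0 none (by omega) (by simp)
    simpa using this

-- B-side: the pure prefix-sum function pvP k t = sum of costs of the first t discs at radius k.
def pvP (Aa Bb k : Int) (S : List Int) : Nat → Int
  | 0 => 0
  | t+1 => pvP Aa Bb k S t + pvCost Aa Bb k (S.getD t 0)

lemma pvShift (f : Nat → Int) :
    ∀ (n j : Nat), (List.range' (j+1) n).map f = (List.range' j n).map (fun t => f (t+1)) := by
  intro n
  induction n with
  | zero => intro j; simp
  | succ n ih => intro j; rw [List.range'_succ, List.range'_succ]; simp [ih]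

lemma pvPrefixP_spec (Aa Bb k : Int) (S : List Int) (g : Nat → Int)
    (hg0 : g 0 = 0 + pvCost Aa Bb k (S.getD 0 0))
    (hgS : ∀ t, g (t+1) = g t + pvCost Aa Bb k (S.getD (t+1) 0)) :
    ∀ (n j : Nat) (acc : Int),
      j + n = S.length →
      acc = (if j = 0 then 0 else g (j-1)) →
      pvPrefixP Aa Bb k acc (S.drop j) = (List.range' j n).map g := by
  intro n
  induction n with
  | zero => intro j acc h _; have : S.drop j = [] := List.drop_eq_nil_of_le (by omega); simp [this, pvPrefixP]
  | succ n ih =>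
    intro j acc h hacc
    have hj : j < S.length := by omega
    have hdrop : S.drop j = S[j] :: S.drop (j+1) := List.drop_eq_getElem_cons hj
    have hgd : S.getD j 0 = S[j] := List.getD_eq_getElem S 0 hj
    rw [hdrop, List.range'_succ, List.map_cons]
    cases j with
    | zero =>
      subst hacc
      simp only [pvPrefixP, reduceIte]
      rw [← hgd, ← hg0]
      refine congrArg₂ List.cons rfl ?_
      simpa using ih 1 (g 0) (by omega) (by simp)
    | succ j' =>
      subst hacc
      rw [if_neg (show ¬(j' + 1 = 0) by omega)]
      simp only [Nat.add_sub_cancel, pvPrefixP]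
      rw [← hgd, ← hgS j']
      refine congrArg₂ List.cons rfl ?_
      simpa using ih (j'+2) (g (j'+1)) (by omega) (by simp)

-- [0] ++ prefix list = the pure prefix-sum function tabulated on 0..N.
lemma pvPrefixEq (Aa Bb k : Int) (S : List Int) :
    (0:Int) :: pvPrefixP Aa Bb k 0 S = (List.range' 0 (S.length+1)).map (pvP Aa Bb k S) := by
  have h := pvPrefixP_spec Aa Bb k S (fun t => pvP Aa Bb k S (t+1))
    (by simp [pvP]) (fun t => by simp [pvP]) S.length 0 0 (by omega) (by simp)
  rw [List.range'_succ, List.map_cons, pvShift]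
  refine congrArg₂ List.cons (by simp [pvP]) ?_
  simpa using h

-- the merge loop: with m the running minimum M, outputs p t + M t.
lemma pvCombine_spec (f p M : Nat → Int)
    (hM : ∀ t, M (t+1) = min (M t) (f (t+1) - p (t+1))) :
    ∀ (n j : Nat) (m : Int), m = M j →
      pvCombine m ((List.range' (j+1) n).map (fun t => (f t, p t)))
        = (List.range' (j+1) n).map (fun t => p t + M t) := by
  intro n
  induction n with
  | zero => intro j m _; simp [pvCombine]
  | succ n ih =>
    intro j m hm
    rw [List.range'_succ, List.map_cons, List.map_cons]
    simp only [pvCombine]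
    rw [hm, ← hM j]
    exact congrArg₂ List.cons rfl (ih (j+1) (M (j+1)) rfl)

-- column 0 of the table is the prefix-sum array of the first candidate.
lemma pvColZero (Aa Bb k0 : Int) (rest S : List Int) :
    (0:Int) :: pvPrefixP Aa Bb k0 0 S
      = (List.range' 0 (S.length+1)).map (fun t => pvTbl Aa Bb (k0::rest) S t 0) := by
  have h := pvPrefixP_spec Aa Bb k0 S (fun t => pvTbl Aa Bb (k0::rest) S (t+1) 0)
    (by beta_reduce; rw [pvTbl_succ_zero, pvTbl_zero]; simp)
    (fun t => by beta_reduce; rw [pvTbl_succ_zero]; simp)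
    S.length 0 0 (by omega) (by simp)
  rw [List.range'_succ, List.map_cons, pvShift]
  refine congrArg₂ List.cons (by simp [pvTbl_zero]) ?_
  simpa using h

-- one merge step advances the column by one candidate index.
lemma pvStep (Aa Bb k0 : Int) (rest S : List Int) (i : Nat) (hi : i < rest.length) :
    ((0:Int) :: pvCombine 0
      ((((List.range' 0 (S.length+1)).map (fun t => pvTbl Aa Bb (k0::rest) S t i)).drop 1).zip
        (((0:Int) :: pvPrefixP Aa Bb rest[i] 0 S).drop 1)))
      = (List.range' 0 (S.length+1)).map (fun t => pvTbl Aa Bb (k0::rest) S t (i+1)) := by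
  have hk : (k0 :: rest).getD (i+1) 0 = rest[i] := by
    simp [List.getD, List.getElem?_eq_getElem hi]
  have hdropG : ((List.range' 0 (S.length+1)).map (fun t => pvTbl Aa Bb (k0::rest) S t i)).drop 1
      = (List.range' 1 S.length).map (fun t => pvTbl Aa Bb (k0::rest) S t i) := by
    rw [List.range'_succ]; simp
  have hdropP : ((0:Int) :: pvPrefixP Aa Bb rest[i] 0 S).drop 1
      = (List.range' 1 S.length).map (pvP Aa Bb rest[i] S) := by
    rw [pvPrefixEq, List.range'_succ]; simp
  have hcomb := pvCombine_spec (fun t => pvTbl Aa Bb (k0::rest) S t i) (pvP Aa Bb rest[i] S)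
      (fun t => pvTbl Aa Bb (k0::rest) S t (i+1) - pvP Aa Bb rest[i] S t)
      (fun t => by
        beta_reduce
        rw [pvTbl_succ_succ, hk]
        have hp : pvP Aa Bb rest[i] S (t+1)
            = pvP Aa Bb rest[i] S t + pvCost Aa Bb rest[i] (S.getD t 0) := by simp [pvP]
        omega)
      S.length 0 0 (by simp [pvTbl_zero, pvP])
  simp only [Nat.zero_add] at hcomb
  rw [hdropG, hdropP, List.zip_map', hcomb]
  rw [List.range'_succ, List.map_cons, pvShift, pvShift]
  refine congrArg₂ List.cons (by simp [pvTbl_zero]) ?_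
  apply List.map_congr_left
  intro t _
  omega

-- B's fold over the remaining candidates.
lemma pvFoldB (Aa Bb k0 : Int) (rest S : List Int) :
    ∀ i, i ≤ rest.length →
      (rest.take i).foldl (fun G k =>
          let P := (0:Int) :: pvPrefixP Aa Bb k 0 S
          (0:Int) :: pvCombine 0 ((G.drop 1).zip (P.drop 1)))
        ((0:Int) :: pvPrefixP Aa Bb k0 0 S)
        = (List.range' 0 (S.length+1)).map (fun t => pvTbl Aa Bb (k0::rest) S t i) := by
  intro i
  induction i with
  | zero => intro _; simpa using pvColZero Aa Bb k0 rest S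
  | succ i ih =>
    intro h
    have hi : i < rest.length := by omega
    rw [List.take_add_one, List.getElem?_eq_getElem hi]
    simp only [Option.toList_some, List.foldl_append, List.foldl_cons, List.foldl_nil]
    rw [ih (by omega)]
    exact pvStep Aa Bb k0 rest S i hi

lemma pvLast_map_range' (f : Nat → Int) (n : Nat) (hn : 0 < n) :
    ((PySem.List.pyGet? ((List.range' 0 n).map f) (-1)).getD 0) = f (n - 1) := by
  rw [PySem.List.pyGet?_neg_one]
  have hlen : ((List.range' 0 n).map f).length = n := by simp
  rw [List.getLast?_eq_getElem?, hlen]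
  have h1 : n - 1 < n := by omega
  rw [List.getElem?_eq_getElem (by simp [h1])]
  simp [List.getElem_range']

-- ===== VERDICT (by name: the statement is the Claim_ definition above) =====
theorem getMinimumSecondsRequired_spec : Claim_equal_getMinimumSecondsRequired := by
  unfold Claim_equal_getMinimumSecondsRequired Spec_getMinimumSecondsRequired
    Pre_getMinimumSecondsRequired
  intro N R Aa Bb _ hR
  set S : List Int := (PySem.List.enumerate R).map (fun ir => ir.2 - ir.1) with hSdef
  set ks : List Int := PySem.List.sorted (PySem.Set.ofList (S.map (fun r => max 1 r))) (fun x => x) false with hksdef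
  have hSlen : S.length = R.length := by simp [hSdef, PySem.List.length_enumerate]
  have hSne : S ≠ [] := by
    intro h; apply hR
    have h2 := congrArg List.length h
    rw [hSlen] at h2
    simpa using h2
  have hSpos : 0 < S.length := List.length_pos_of_ne_nil hSne
  have hksne : ks ≠ [] := by
    have hmem : max 1 (S.getD 0 0) ∈ S.map (fun r => max 1 r) := by
      rw [List.getD_eq_getElem S 0 hSpos]
      exact List.mem_map_of_mem (List.getElem_mem hSpos)
    have : max 1 (S.getD 0 0) ∈ ks := by
      rw [hksdef, PySem.List.mem_sorted]
      exact (PySem.Set.mem_ofList _ _).mpr hmem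
    exact List.ne_nil_of_mem this
  have hkpos : 0 < ks.length := List.length_pos_of_ne_nil hksne
  obtain ⟨k0, rest, hks⟩ := List.exists_cons_of_ne_nil hksne
  -- evaluate port A
  have hA : getMinimumSecondsRequired N R Aa Bb = pvTbl Aa Bb ks S S.length (ks.length - 1) := by
    show (PySem.List.pyGet? (S.foldl (fun arr r => pvRowA Aa Bb r none (ks.zip arr))
        (List.replicate ks.length 0)) (-1)).getD 0 = _
    have hfull := pvFoldA Aa Bb ks S S.length (le_refl _)
    rw [List.take_length] at hfull
    rw [hfull]
    exact pvLast_map_range' _ _ hkpos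
  -- evaluate port B
  have hB : getMinimumSecondsRequired_alt N R Aa Bb = pvTbl Aa Bb ks S S.length rest.length := by
    show (match ks with
      | [] => (0 : Int)
      | k0 :: rest =>
        let G0 := (0 : Int) :: pvPrefixP Aa Bb k0 0 S
        let G := rest.foldl (fun G k =>
          let P := (0 : Int) :: pvPrefixP Aa Bb k 0 S
          (0 : Int) :: pvCombine 0 ((G.drop 1).zip (P.drop 1))) G0
        (PySem.List.pyGet? G (-1)).getD 0) = _
    rw [hks]
    simp only []
    have hfull := pvFoldB Aa Bb k0 rest S rest.length (le_refl _)
    rw [List.take_length] at hfull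
    rw [hfull, pvLast_map_range' _ _ (by omega : 0 < S.length + 1)]
    rw [← hks]
    simp
  rw [hA, hB]
  have h2 : ks.length - 1 = rest.length := by rw [hks]; simp
  rw [h2]
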